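-- pv_equiv track=rewrite | github.com/AlexPerazzo/AdventofCode2022 | Advent Of Code 2022/Fresh 11th, 2022.py | monkey7_throw
-- ===== SOURCE A (Python) =====
-- def monkey7_throw(monkey0_count, monkey0_list, monkey6_list, monkey2_list):
--     for item in monkey0_list:
--         value = 5 + item
--         while value > 10000000:
--             value = value - 9699690
--
--         if value % 17 == 0:
--             monkey6_list.append(value)
--         else:
--             monkey2_list.append(value)
--         monkey0_count += 1
--     monkey0_list.clear()
--
--     return monkey0_count, monkey0_list, monkey6_list, monkey2_list
-- ===== SOURCE B (Python) =====
-- def _reduce(v):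
--     # closed form of "while v > 10000000: v -= 9699690":
--     # result lands in the interval (300310, 10000000], same residue mod 9699690
--     if v > 10000000:
--         v = 300311 + (v - 300311) % 9699690
--     return v
--
-- def monkey7_throw(monkey0_count, monkey0_list, monkey6_list, monkey2_list):
--     vals = [_reduce(5 + item) for item in monkey0_list]
--     monkey6_list.extend(v for v in vals if v % 17 == 0)
--     monkey2_list.extend(v for v in vals if v % 17 != 0)
--     monkey0_count += len(monkey0_list)
--     monkey0_list.clear()
--     return monkey0_count, monkey0_list, monkey6_list, monkey2_list
-- ===== Notes on version B (the rewrite author's own statement) =====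
-- stated objective: alternative
-- what changed: Replaces the per-item repeated-subtraction while loop with a single modular closed form (300311 + (v-300311) % 9699690) and builds the two partitions with filtering comprehensions over a precomputed value list instead of appending inside the loop.
import Mathlib
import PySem

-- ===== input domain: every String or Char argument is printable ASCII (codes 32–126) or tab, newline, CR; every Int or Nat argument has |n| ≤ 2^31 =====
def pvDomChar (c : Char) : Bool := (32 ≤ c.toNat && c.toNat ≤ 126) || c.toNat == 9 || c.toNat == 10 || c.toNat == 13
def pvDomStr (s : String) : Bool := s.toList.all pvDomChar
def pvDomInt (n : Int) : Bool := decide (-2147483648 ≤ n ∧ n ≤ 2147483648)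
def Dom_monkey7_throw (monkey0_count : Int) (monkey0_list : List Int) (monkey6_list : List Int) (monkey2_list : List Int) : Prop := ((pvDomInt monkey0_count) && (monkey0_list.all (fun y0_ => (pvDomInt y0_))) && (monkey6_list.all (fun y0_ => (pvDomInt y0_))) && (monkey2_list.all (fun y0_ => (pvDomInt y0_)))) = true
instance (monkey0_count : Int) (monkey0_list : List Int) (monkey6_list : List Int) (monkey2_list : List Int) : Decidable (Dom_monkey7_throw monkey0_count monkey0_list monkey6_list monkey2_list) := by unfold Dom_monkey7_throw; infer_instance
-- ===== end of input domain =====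

-- ===== PORT A =====
-- B replaces A's repeated-subtraction loop by a modular closed form and builds the partitions by filtering; equivalence is about the return value (A mutates its list arguments in place, B performs the analogous mutations).
-- literal port of "while value > 10000000: value = value - 9699690"
def pvLoopA (v : Int) : Int :=
  if v > 10000000 then pvLoopA (v - 9699690) else v
termination_by (v - 10000000).toNat
decreasing_by omega

def monkey7_throw (monkey0_count : Int) (monkey0_list : List Int) (monkey6_list : List Int) (monkey2_list : List Int) : Int × List Int × List Int × List Int :=
  let r := monkey0_list.foldl
    (fun (st : Int × List Int × List Int) (item : Int) =>
      let value := pvLoopA (5 + item)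
      if PySem.Int.mod value 17 == 0 then
        (st.1 + 1, st.2.1 ++ [value], st.2.2)
      else
        (st.1 + 1, st.2.1, st.2.2 ++ [value]))
    (monkey0_count, monkey6_list, monkey2_list)
  (r.1, ([] : List Int), r.2.1, r.2.2)

-- ===== PORT B =====
-- closed form of the subtraction loop: result lands in (300310, 10000000], same residue mod 9699690
def pvReduce (v : Int) : Int :=
  if v > 10000000 then 300311 + PySem.Int.mod (v - 300311) 9699690 else v

def monkey7_throw_alt (monkey0_count : Int) (monkey0_list : List Int) (monkey6_list : List Int) (monkey2_list : List Int) : Int × List Int × List Int × List Int :=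
  let vals := monkey0_list.map (fun item => pvReduce (5 + item))
  (monkey0_count + monkey0_list.length,
   ([] : List Int),
   monkey6_list ++ vals.filter (fun v => PySem.Int.mod v 17 == 0),
   monkey2_list ++ vals.filter (fun v => !(PySem.Int.mod v 17 == 0)))
-- ===== PRECONDITION & SPEC =====
def Spec_monkey7_throw (monkey0_count : Int) (monkey0_list : List Int) (monkey6_list : List Int) (monkey2_list : List Int) (out : Int × List Int × List Int × List Int) : Prop := out = monkey7_throw_alt monkey0_count monkey0_list monkey6_list monkey2_list
instance (monkey0_count : Int) (monkey0_list : List Int) (monkey6_list : List Int) (monkey2_list : List Int) (out : Int × List Int × List Int × List Int) : Decidable (Spec_monkey7_throw monkey0_count monkey0_list monkey6_list monkey2_list out) := by unfold Spec_monkey7_throw; infer_instance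

-- ===== CLAIM (what is proved, stated in full; the proofs are below) =====
def Claim_equal_monkey7_throw : Prop := ∀ (monkey0_count : Int) (monkey0_list : List Int) (monkey6_list : List Int) (monkey2_list : List Int), Dom_monkey7_throw monkey0_count monkey0_list monkey6_list monkey2_list → Spec_monkey7_throw monkey0_count monkey0_list monkey6_list monkey2_list (monkey7_throw monkey0_count monkey0_list monkey6_list monkey2_list)

-- ===== LEMMAS AND PROOFS =====
theorem pvLoopA_eq_pvReduce (v : Int) : pvLoopA v = pvReduce v := by
  rw [pvLoopA]
  split
  · rename_i h
    rw [pvLoopA_eq_pvReduce (v - 9699690)]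
    unfold pvReduce
    rw [PySem.Int.mod_eq_emod_of_pos (by norm_num), PySem.Int.mod_eq_emod_of_pos (by norm_num)]
    by_cases h2 : v - 9699690 > 10000000
    · simp only [if_pos h2, if_pos h]
      rw [show v - 9699690 - 300311 = v - 300311 - 9699690 by ring, Int.sub_emod_right]
    · simp only [if_neg h2, if_pos h]
      have : v - 300311 = (v - 10000001) + 9699690 * 1 := by ring
      rw [this, Int.add_mul_emod_self_left, Int.emod_eq_of_lt (by omega) (by omega)]
      omega
  · rename_i h
    unfold pvReduce
    rw [if_neg h]
termination_by (v - 10000000).toNat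
decreasing_by omega

theorem pv_fold_eq (l : List Int) (c : Int) (l6 l2 : List Int) :
    l.foldl
      (fun (st : Int × List Int × List Int) (item : Int) =>
        let value := pvLoopA (5 + item)
        if PySem.Int.mod value 17 == 0 then
          (st.1 + 1, st.2.1 ++ [value], st.2.2)
        else
          (st.1 + 1, st.2.1, st.2.2 ++ [value]))
      (c, l6, l2)
    = (c + l.length,
       l6 ++ (l.map (fun item => pvLoopA (5 + item))).filter (fun v => PySem.Int.mod v 17 == 0),
       l2 ++ (l.map (fun item => pvLoopA (5 + item))).filter (fun v => !(PySem.Int.mod v 17 == 0))) := by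
  induction l generalizing c l6 l2 with
  | nil => simp
  | cons x xs ih =>
    rw [List.foldl_cons]
    simp only [List.map_cons, List.filter_cons, List.length_cons]
    by_cases hx : (PySem.Int.mod (pvLoopA (5 + x)) 17 == 0) = true
    · simp only [hx, Bool.not_true, Bool.false_eq_true, if_true, if_false]
      refine (ih (c + 1) (l6 ++ [pvLoopA (5 + x)]) l2).trans ?_
      simp [List.append_assoc]
      ring
    · simp only [Bool.not_eq_true] at hx
      simp only [hx, Bool.not_false, Bool.false_eq_true, if_true, if_false]
      refine (ih (c + 1) l6 (l2 ++ [pvLoopA (5 + x)])).trans ?_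
      simp [List.append_assoc]
      ring

-- ===== VERDICT (by name: the statement is the Claim_ definition above) =====
theorem monkey7_throw_spec : Claim_equal_monkey7_throw := by
  intro c l0 l6 l2 _
  unfold Spec_monkey7_throw monkey7_throw monkey7_throw_alt
  rw [pv_fold_eq]
  simp [pvLoopA_eq_pvReduce]
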